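-- pv_equiv track=rewrite | github.com/jsakaya/pymc-supply-chain | pymc_supply_chain/demand/hierarchical.py | _generate_hierarchy_combinations
-- ===== SOURCE A (Python) =====
-- from typing import Any, Dict, List, Optional
--
-- def _generate_hierarchy_combinations(
--
--     hierarchy_values: Dict[str, List[Any]]
-- ) -> List[Dict[str, Any]]:
--     """Generate all combinations of hierarchy values."""
--     import itertools
--
--     keys = list(hierarchy_values.keys())
--     values = [hierarchy_values[k] for k in keys]
--
--     combinations = []
--     for combo in itertools.product(*values):
--         combinations.append(dict(zip(keys, combo)))
--
--     return combinations
-- ===== SOURCE B (Python) =====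
-- def _generate_hierarchy_combinations(hierarchy_values):
--     """Generate all combinations of hierarchy values by iterative expansion."""
--     result = [{}]
--     for key, vals in hierarchy_values.items():
--         result = [{**partial, key: v} for partial in result for v in vals]
--     return result
-- ===== Notes on version B (the rewrite author's own statement) =====
-- stated objective: simpler
-- what changed: Replaces itertools.product plus dict(zip(keys, combo)) with an incremental fold: a growing list of partial dicts is expanded key by key, so no key/value index lists and no tuple product are ever built.
import Mathlib
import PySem

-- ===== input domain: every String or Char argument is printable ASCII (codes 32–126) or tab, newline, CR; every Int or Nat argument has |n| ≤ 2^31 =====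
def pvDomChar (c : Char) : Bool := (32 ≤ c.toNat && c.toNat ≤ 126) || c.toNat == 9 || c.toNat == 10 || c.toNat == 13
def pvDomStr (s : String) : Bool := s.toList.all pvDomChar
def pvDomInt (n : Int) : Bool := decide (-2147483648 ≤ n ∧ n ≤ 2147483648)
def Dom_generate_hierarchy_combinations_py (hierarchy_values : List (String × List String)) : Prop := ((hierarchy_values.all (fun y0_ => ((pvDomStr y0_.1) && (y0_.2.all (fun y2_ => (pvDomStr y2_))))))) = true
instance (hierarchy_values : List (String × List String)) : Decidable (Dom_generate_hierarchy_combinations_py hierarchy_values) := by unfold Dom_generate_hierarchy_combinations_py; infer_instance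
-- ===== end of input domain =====

-- B replaces itertools.product + dict(zip(keys, combo)) with an incremental fold that
-- extends a growing list of partial dicts one key at a time (same return value, shorter code).

-- ===== PORT A =====
-- itertools.product(*values): first list varies slowest, literally a flatMap over the
-- first list with the product of the rest inside (exact for product of lists).
def pvProduct : List (List String) → List (List String)
  | [] => [[]]
  | v :: vs => v.flatMap (fun x => (pvProduct vs).map (fun c => x :: c))

-- A: keys = list(d.keys()); values = [d[k] for k in keys] (k ∈ keys, so d[k] never raises:
-- getD with [] is exact); append dict(zip(keys, combo)) for each combo of the product.
def generate_hierarchy_combinations_py (hierarchy_values : List (String × List String)) : List (List (String × String)) :=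
  let d := PySem.Dict.ofList hierarchy_values
  let keys := d.keys
  let values := keys.map (fun k => d.getD k [])
  (pvProduct values).map (fun combo => (PySem.Dict.ofList (keys.zip combo)).items)

-- ===== PORT B =====
-- B: result = [{}]; for key, vals in d.items(): result = [{**partial, key: v} for partial in result for v in vals]
def generate_hierarchy_combinations_py_alt (hierarchy_values : List (String × List String)) : List (List (String × String)) :=
  ((PySem.Dict.ofList hierarchy_values).items.foldl
      (fun result kv => result.flatMap (fun part => kv.2.map (fun v => part.insert kv.1 v)))
      [PySem.Dict.empty]).map PySem.Dict.items

-- ===== PRECONDITION & SPEC =====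
def Spec_generate_hierarchy_combinations_py (hierarchy_values : List (String × List String)) (out : List (List (String × String))) : Prop := out = generate_hierarchy_combinations_py_alt hierarchy_values
instance (hierarchy_values : List (String × List String)) (out : List (List (String × String))) : Decidable (Spec_generate_hierarchy_combinations_py hierarchy_values out) := by unfold Spec_generate_hierarchy_combinations_py; infer_instance

-- ===== CLAIM (what is proved, stated in full; the proofs are below) =====
def Claim_equal_generate_hierarchy_combinations_py : Prop := ∀ (hierarchy_values : List (String × List String)), Dom_generate_hierarchy_combinations_py hierarchy_values → Spec_generate_hierarchy_combinations_py hierarchy_values (generate_hierarchy_combinations_py hierarchy_values)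

-- ===== LEMMAS AND PROOFS =====

-- every combo in the product of vs has the same length as vs
theorem pv_mem_product_length (vs : List (List String)) (c : List String)
    (hc : c ∈ pvProduct vs) : c.length = vs.length := by
  induction vs generalizing c with
  | nil => simp [pvProduct] at hc; simp [hc]
  | cons v vs ih =>
    simp only [pvProduct, List.mem_flatMap, List.mem_map] at hc
    obtain ⟨x, _, c', hc', rfl⟩ := hc
    simp [ih c' hc']

-- the zipped combinations of an association list L (keys assumed distinct elsewhere)
def pvZipCombos (L : List (String × List String)) : List (List (String × String)) :=
  (pvProduct (L.map Prod.snd)).map (fun c => (L.map Prod.fst).zip c)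

theorem pvZipCombos_cons (k : String) (vs : List String) (L : List (String × List String)) :
    pvZipCombos ((k, vs) :: L)
      = vs.flatMap (fun v => (pvZipCombos L).map (fun c => (k, v) :: c)) := by
  simp only [pvZipCombos, List.map_cons, pvProduct, List.map_flatMap, List.map_map]
  refine List.flatMap_congr (fun x _ => ?_)
  simp [Function.comp_def]

-- characterisation of B's fold: starting from any accumulator of dicts whose keys avoid
-- every key of L, the fold produces each partial dict extended by each zipped combo of L.
theorem pv_fold_char (L : List (String × List String))
    (acc : List (PySem.Dict String String))
    (h1 : ∀ p ∈ acc, ∀ k ∈ L.map Prod.fst, p.contains k = false)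
    (hL : (L.map Prod.fst).Nodup) :
    (L.foldl (fun result kv => result.flatMap (fun part => kv.2.map (fun v => part.insert kv.1 v))) acc).map PySem.Dict.items
      = acc.flatMap (fun p => (pvZipCombos L).map (fun c => p.items ++ c)) := by
  induction L generalizing acc with
  | nil =>
    rw [List.foldl_nil, show pvZipCombos [] = [[]] from rfl]
    induction acc with
    | nil => rfl
    | cons p acc ihp => simp_all
  | cons kv L ih =>
    obtain ⟨k, vs⟩ := kv
    simp only [List.map_cons, List.nodup_cons] at hL
    have h1' : ∀ q ∈ acc.flatMap (fun part => vs.map (fun v => part.insert k v)),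
        ∀ k' ∈ L.map Prod.fst, q.contains k' = false := by
      intro q hq k' hk'
      simp only [List.mem_flatMap, List.mem_map] at hq
      obtain ⟨p, hp, v, _, rfl⟩ := hq
      rw [PySem.Dict.contains_insert]
      have hk'k : (k' == k) = false := by
        simp only [beq_eq_false_iff_ne, ne_eq]
        rintro rfl; exact hL.1 hk'
      simp [hk'k, h1 p hp k' (by simp [hk'])]
    rw [List.foldl_cons, ih _ h1' hL.2, pvZipCombos_cons, List.flatMap_assoc]
    refine List.flatMap_congr (fun p hp => ?_)
    rw [List.flatMap_map, List.map_flatMap]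
    refine List.flatMap_congr (fun v _ => ?_)
    rw [List.map_map]
    refine List.map_congr_left (fun c _ => ?_)
    simp [PySem.Dict.items_insert_of_not_contains p v (h1 p hp k (by simp))]

-- dict(zip(keys, combo)) with distinct keys: ofList is the zip itself (as items)
theorem pv_ofList_zip_items (keys : List String) (c : List String)
    (hn : keys.Nodup) (hlen : c.length = keys.length) :
    (PySem.Dict.ofList (keys.zip c)).items = keys.zip c := by
  have hfst : (keys.zip c).map Prod.fst = keys := by
    rw [List.map_fst_zip]; omega
  have := PySem.Dict.items_foldl_insert_fresh (keys.zip c) Prod.fst Prod.snd PySem.Dict.empty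
    (fun a _ => by simp) (by rw [hfst]; exact hn)
  simpa [PySem.Dict.ofList] using this

-- ===== VERDICT (by name: the statement is the Claim_ definition above) =====
theorem generate_hierarchy_combinations_py_spec : Claim_equal_generate_hierarchy_combinations_py := by
  intro hv _
  show generate_hierarchy_combinations_py hv = generate_hierarchy_combinations_py_alt hv
  have hnd : (PySem.Dict.ofList hv).keys.Nodup := PySem.Dict.nodup_keys_ofList hv
  have hitems : (PySem.Dict.ofList hv).items
      = (PySem.Dict.ofList hv).keys.map (fun k => (k, (PySem.Dict.ofList hv).getD k [])) :=
    PySem.Dict.items_eq_map_keys _ hnd []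
  have hfst : (PySem.Dict.ofList hv).items.map Prod.fst = (PySem.Dict.ofList hv).keys := by
    rw [hitems, List.map_map]; simp [Function.comp_def]
  have hsnd : (PySem.Dict.ofList hv).items.map Prod.snd
      = (PySem.Dict.ofList hv).keys.map (fun k => (PySem.Dict.ofList hv).getD k []) := by
    rw [hitems, List.map_map]; simp [Function.comp_def]
  show (pvProduct ((PySem.Dict.ofList hv).keys.map fun k => (PySem.Dict.ofList hv).getD k [])).map
      (fun combo => (PySem.Dict.ofList ((PySem.Dict.ofList hv).keys.zip combo)).items)
      = ((PySem.Dict.ofList hv).items.foldl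
          (fun result kv => result.flatMap (fun part => kv.2.map (fun v => part.insert kv.1 v)))
          [PySem.Dict.empty]).map PySem.Dict.items
  rw [pv_fold_char _ [PySem.Dict.empty]
      (by intro p hp k _; simp only [List.mem_singleton] at hp; subst hp; rfl)
      (by rw [hfst]; exact hnd)]
  simp only [List.flatMap_cons, List.flatMap_nil, List.append_nil]
  rw [show (PySem.Dict.empty : PySem.Dict String String).items = [] from rfl]
  simp only [List.nil_append, List.map_id', pvZipCombos, hfst, hsnd]
  refine List.map_congr_left (fun c hc => ?_)
  exact pv_ofList_zip_items (PySem.Dict.ofList hv).keys c hnd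
    (by rw [pv_mem_product_length _ c hc]; simp)
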